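-- pv_equiv track=rewrite | github.com/chrismerrill1974/astrobiology_research | shared/dimensional_opening/network_generator.py | _is_autocatalytic
-- ===== SOURCE A (Python) =====
-- from typing import List, Dict, Set, Tuple, Optional
--
-- def _is_autocatalytic(reactants: List[str], products: List[str]) -> bool:
--     """Check if reaction is autocatalytic."""
--     reactant_counts = {}
--     for r in reactants:
--         reactant_counts[r] = reactant_counts.get(r, 0) + 1
--     product_counts = {}
--     for p in products:
--         product_counts[p] = product_counts.get(p, 0) + 1
--
--     for sp in product_counts:
--         if product_counts[sp] > reactant_counts.get(sp, 0):
--             if sp in reactant_counts: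
--                 return True
--     return False
-- ===== SOURCE B (Python) =====
-- def _is_autocatalytic(reactants, products):
--     """Sort both sides and compare per-species run lengths in one merge-style scan."""
--     rs = sorted(reactants)
--     ps = sorted(products)
--     while rs:
--         sp = rs[0]
--         rrun = 1
--         while rrun < len(rs) and rs[rrun] == sp:
--             rrun += 1
--         while ps and ps[0] < sp:
--             ps = ps[1:]
--         prun = 0
--         while prun < len(ps) and ps[prun] == sp:
--             prun += 1
--         if prun > rrun:
--             return True
--         rs = rs[rrun:]
--         ps = ps[prun:]
--     return False
-- ===== Notes on version B (the rewrite author's own statement) =====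
-- stated objective: alternative
-- what changed: Replaces A's hash-counting (two count dicts plus a pass over product keys) with sort-then-merge: B sorts both lists and walks them once in a merge-style scan, comparing the run length of each reactant species against its aligned run in the sorted products; no counting structure and no per-species count lookup remain.
import Mathlib
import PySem

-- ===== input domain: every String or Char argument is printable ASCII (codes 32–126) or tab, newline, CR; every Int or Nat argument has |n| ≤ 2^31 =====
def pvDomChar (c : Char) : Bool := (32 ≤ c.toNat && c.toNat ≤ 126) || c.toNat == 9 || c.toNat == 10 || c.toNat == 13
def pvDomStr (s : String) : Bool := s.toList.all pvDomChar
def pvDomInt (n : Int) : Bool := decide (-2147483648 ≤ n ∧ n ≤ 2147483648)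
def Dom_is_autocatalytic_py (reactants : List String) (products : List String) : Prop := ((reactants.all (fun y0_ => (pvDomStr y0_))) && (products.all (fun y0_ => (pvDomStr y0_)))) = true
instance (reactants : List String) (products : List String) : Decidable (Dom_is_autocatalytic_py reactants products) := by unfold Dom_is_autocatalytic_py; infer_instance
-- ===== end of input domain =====

-- B replaces A's hash counting by sort-then-merge: sort both lists once and compare per-species
-- run lengths in a single merge-style scan (alternative algorithm, no counting structure).


-- ===== PORT A =====
-- 'for sp in product_counts: if product_counts[sp] > reactant_counts.get(sp, 0): if sp in reactant_counts: return True' / 'return False'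
def isAutoLoopA (rc pc : PySem.Dict String Int) : List String → Bool
  | [] => false
  | sp :: rest =>
    if pc.getD sp 0 > rc.getD sp 0 then
      if rc.contains sp then true else isAutoLoopA rc pc rest
    else isAutoLoopA rc pc rest

def is_autocatalytic_py (reactants : List String) (products : List String) : Bool :=
  let reactant_counts := reactants.foldl (fun d r => d.insert r (d.getD r 0 + 1)) PySem.Dict.empty
  let product_counts := products.foldl (fun d p => d.insert p (d.getD p 0 + 1)) PySem.Dict.empty
  isAutoLoopA reactant_counts product_counts product_counts.keys

-- ===== PORT B =====
-- the 'while rs:' loop of Source B: run of rs[0] in rs, drop products below it, its run in products,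
-- compare, then continue on the remaining suffixes
def pvScan : List String → List String → Bool
  | [], _ => false
  | sp :: rest, ps =>
    let rrun := 1 + (rest.takeWhile (fun r => r == sp)).length
    let ps1 := ps.dropWhile (fun p => decide (p < sp))
    let prun := (ps1.takeWhile (fun p => p == sp)).length
    if prun > rrun then true
    else pvScan (rest.dropWhile (fun r => r == sp)) (ps1.drop prun)
termination_by rs _ => rs.length
decreasing_by
  have := List.length_dropWhile_le (fun r => r == sp) rest
  simp; omega

def is_autocatalytic_py_alt (reactants : List String) (products : List String) : Bool :=
  pvScan (PySem.List.sorted reactants (fun x => x) false)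
         (PySem.List.sorted products (fun x => x) false)

-- ===== PRECONDITION & SPEC =====
def Spec_is_autocatalytic_py (reactants : List String) (products : List String) (out : Bool) : Prop := out = is_autocatalytic_py_alt reactants products
instance (reactants : List String) (products : List String) (out : Bool) : Decidable (Spec_is_autocatalytic_py reactants products out) := by unfold Spec_is_autocatalytic_py; infer_instance

-- ===== CLAIM (what is proved, stated in full; the proofs are below) =====
def Claim_equal_is_autocatalytic_py : Prop := ∀ (reactants : List String) (products : List String), Dom_is_autocatalytic_py reactants products → Spec_is_autocatalytic_py reactants products (is_autocatalytic_py reactants products)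

-- ===== LEMMAS AND PROOFS =====

-- the condition both programs decide for a species sp
def isAutoP (reactants products : List String) (sp : String) : Bool :=
  decide (products.count sp > reactants.count sp)

lemma isAutoLoopA_eq_any (rc pc : PySem.Dict String Int) (l : List String) :
    isAutoLoopA rc pc l = l.any (fun sp => decide (pc.getD sp 0 > rc.getD sp 0) && rc.contains sp) := by
  induction l with
  | nil => rfl
  | cons sp rest ih =>
    simp only [isAutoLoopA, List.any_cons, ih]
    by_cases h1 : pc.getD sp 0 > rc.getD sp 0 <;>
      by_cases h2 : rc.contains sp <;> simp [h1, h2]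

-- A scans the distinct products with a reactant-membership guard; that equals scanning reactants
lemma any_products_eq_any_reactants (reactants products : List String) :
    ((PySem.Set.ofList products).any
        (fun sp => isAutoP reactants products sp && decide (sp ∈ reactants)))
      = reactants.any (isAutoP reactants products) := by
  rcases h : reactants.any (isAutoP reactants products) with _ | _
  · rw [List.any_eq_false] at h ⊢
    intro sp hsp
    by_cases hr : sp ∈ reactants
    · simp [h sp hr, hr]
    · simp [hr]
  · rw [List.any_eq_true] at h ⊢
    obtain ⟨sp, hsp, hP⟩ := h
    refine ⟨sp, ?_, by simp [hP, hsp]⟩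
    rw [PySem.Set.mem_ofList]
    have h1 : 0 < reactants.count sp := List.count_pos_iff.mpr hsp
    have h2 : reactants.count sp < products.count sp := by simpa [isAutoP] using hP
    exact List.count_pos_iff.mp (by omega)

-- sorted-list facts for the merge scan
lemma dropWhile_eq_drop_len_takeWhile (p : String → Bool) (l : List String) :
    l.dropWhile p = l.drop (l.takeWhile p).length := by
  induction l with
  | nil => rfl
  | cons a l ih =>
    by_cases h : p a = true
    · simp [h, ih]
    · simp [h]

lemma any_congr_mem (l : List String) (f g : String → Bool) (h : ∀ x ∈ l, f x = g x) :
    l.any f = l.any g := by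
  induction l with
  | nil => rfl
  | cons a l ih => simp only [List.any_cons, h a List.mem_cons_self,
      ih (fun x hx => h x (List.mem_cons_of_mem _ hx))]

lemma gt_of_mem_dropWhile_beq (sp : String) :
    ∀ (l : List String), l.Pairwise (· ≤ ·) → (∀ x ∈ l, sp ≤ x) →
    ∀ x ∈ l.dropWhile (fun r => r == sp), sp < x := by
  intro l
  induction l with
  | nil => intro _ _ x hx; simp [List.dropWhile] at hx
  | cons a l ih =>
    intro hp hlo x hx
    by_cases ha : a = sp
    · subst ha
      simp only [List.dropWhile_cons, beq_self_eq_true] at hx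
      exact ih hp.tail (fun y hy => hlo y (List.mem_cons_of_mem _ hy)) x hx
    · have hcond : (a == sp) = false := beq_eq_false_iff_ne.mpr ha
      simp only [List.dropWhile_cons, hcond] at hx
      simp only [Bool.false_eq_true, if_false] at hx
      have hsa : sp < a := lt_of_le_of_ne (hlo a List.mem_cons_self) (fun h => ha h.symm)
      rcases List.mem_cons.mp hx with rfl | hx
      · exact hsa
      · exact lt_of_lt_of_le hsa (List.rel_of_pairwise_cons hp hx)

lemma ge_of_mem_dropWhile_lt (sp : String) :
    ∀ (l : List String), l.Pairwise (· ≤ ·) →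
    ∀ x ∈ l.dropWhile (fun p => decide (p < sp)), sp ≤ x := by
  intro l
  induction l with
  | nil => intro _ x hx; simp [List.dropWhile] at hx
  | cons a l ih =>
    intro hp x hx
    by_cases ha : a < sp
    · simp only [List.dropWhile_cons, decide_eq_true ha] at hx
      exact ih hp.tail x hx
    · simp only [List.dropWhile_cons, decide_eq_false ha, Bool.false_eq_true, if_false] at hx
      rcases List.mem_cons.mp hx with rfl | hx
      · exact le_of_not_gt ha
      · exact le_trans (le_of_not_gt ha) (List.rel_of_pairwise_cons hp hx)

lemma count_takeWhile_beq (sp : String) (l : List String) :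
    (l.takeWhile (fun r => r == sp)).count sp = (l.takeWhile (fun r => r == sp)).length := by
  rw [List.count_eq_length]
  intro b hb
  exact (eq_of_beq (List.mem_takeWhile_imp (p := fun r => r == sp) hb)).symm

lemma count_takeWhile_beq_ne (sp x : String) (hx : x ≠ sp) (l : List String) :
    (l.takeWhile (fun r => r == sp)).count x = 0 := by
  rw [List.count_eq_zero]
  intro hm
  exact hx (eq_of_beq (List.mem_takeWhile_imp (p := fun r => r == sp) hm))

lemma count_dropWhile_lt (sp x : String) (hx : sp ≤ x) (l : List String) :
    (l.dropWhile (fun p => decide (p < sp))).count x = l.count x := by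
  conv_rhs => rw [← List.takeWhile_append_dropWhile (p := fun p => decide (p < sp)) (l := l)]
  rw [List.count_append]
  have h0 : (l.takeWhile (fun p => decide (p < sp))).count x = 0 := by
    rw [List.count_eq_zero]
    intro hm
    have := of_decide_eq_true (List.mem_takeWhile_imp (p := fun p => decide (p < sp)) hm)
    exact absurd (lt_of_lt_of_le this hx) (lt_irrefl x)
  omega

-- count of the head species on each side, read off the runs the scan measures
lemma count_head_reactants (sp : String) (rest : List String)
    (hrs : (sp :: rest).Pairwise (· ≤ ·)) :
    (sp :: rest).count sp = 1 + (rest.takeWhile (fun r => r == sp)).length := by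
  have hsplit := List.takeWhile_append_dropWhile (p := fun r => r == sp) (l := rest)
  have h0 : (rest.dropWhile (fun r => r == sp)).count sp = 0 := by
    rw [List.count_eq_zero]
    intro hm
    exact absurd rfl (ne_of_gt (gt_of_mem_dropWhile_beq sp rest hrs.tail
      (fun y hy => List.rel_of_pairwise_cons hrs hy) sp hm))
  have := congrArg (List.count sp) hsplit
  rw [List.count_append, count_takeWhile_beq, h0] at this
  rw [List.count_cons_self, ← this]
  omega

lemma count_head_products (sp : String) (ps : List String)
    (hps : ps.Pairwise (· ≤ ·)) :
    ps.count sp = ((ps.dropWhile (fun p => decide (p < sp))).takeWhile (fun p => p == sp)).length := by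
  set ps1 := ps.dropWhile (fun p => decide (p < sp)) with hps1
  have hps1pw : ps1.Pairwise (· ≤ ·) := List.Pairwise.sublist (List.dropWhile_sublist _) hps
  have hge : ∀ x ∈ ps1, sp ≤ x := ge_of_mem_dropWhile_lt sp ps hps
  have h0 : (ps1.dropWhile (fun p => p == sp)).count sp = 0 := by
    rw [List.count_eq_zero]
    intro hm
    exact absurd rfl (ne_of_gt (gt_of_mem_dropWhile_beq sp ps1 hps1pw hge sp hm))
  have hsplit := List.takeWhile_append_dropWhile (p := fun p => p == sp) (l := ps1)
  have := congrArg (List.count sp) hsplit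
  rw [List.count_append, count_takeWhile_beq, h0] at this
  rw [← count_dropWhile_lt sp sp le_rfl ps, ← hps1, ← this]
  omega

-- the merge scan on sorted lists decides ∃ x ∈ rs, count ps x > count rs x
lemma pvScan_eq_any (rs ps : List String) :
    rs.Pairwise (· ≤ ·) → ps.Pairwise (· ≤ ·) →
    pvScan rs ps = rs.any (fun x => decide (ps.count x > rs.count x)) := by
  induction rs, ps using pvScan.induct with
  | case1 ps => intro _ _; simp [pvScan]
  | case2 sp rest ps =>
    intro hrs hps
    rename_i htrue
    rw [pvScan, if_pos htrue]
    have hsp : decide (ps.count sp > (sp :: rest).count sp) = true := by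
      rw [count_head_reactants sp rest hrs, count_head_products sp ps hps]
      exact decide_eq_true htrue
    simp only [List.any_cons, hsp, Bool.true_or]
  | case3 sp rest ps =>
    intro hrs hps
    rename_i hfalse ih
    set tw := rest.takeWhile (fun r => r == sp) with htw
    set rest' := rest.dropWhile (fun r => r == sp) with hrest'
    set ps1 := ps.dropWhile (fun p => decide (p < sp)) with hps1
    set pw := ps1.takeWhile (fun p => p == sp) with hpw
    rw [pvScan, if_neg hfalse]
    have hps1pw : ps1.Pairwise (· ≤ ·) := List.Pairwise.sublist (List.dropWhile_sublist _) hps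
    have hps2eq : ps1.drop pw.length = ps1.dropWhile (fun p => p == sp) := by
      rw [dropWhile_eq_drop_len_takeWhile]
    have hrest'pw : rest'.Pairwise (· ≤ ·) :=
      List.Pairwise.sublist (List.dropWhile_sublist _) hrs.tail
    have hps2pw : (ps1.drop pw.length).Pairwise (· ≤ ·) :=
      List.Pairwise.sublist (List.drop_sublist _ _) hps1pw
    rw [ih hrest'pw hps2pw]
    -- the head species fails the test, and its whole run carries the same (false) test
    have hspf : decide (ps.count sp > (sp :: rest).count sp) = false := by
      rw [count_head_reactants sp rest hrs, count_head_products sp ps hps]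
      exact decide_eq_false hfalse
    have hgt : ∀ x ∈ rest', sp < x :=
      gt_of_mem_dropWhile_beq sp rest hrs.tail (fun y hy => List.rel_of_pairwise_cons hrs hy)
    have hcnt : ∀ x ∈ rest',
        (decide ((ps1.drop pw.length).count x > rest'.count x))
          = (decide (ps.count x > (sp :: rest).count x)) := by
      intro x hx
      have hxgt : sp < x := hgt x hx
      have hxne : x ≠ sp := ne_of_gt hxgt
      have h1 : (sp :: rest).count x = rest'.count x := by
        have hsplit := congrArg (List.count x) (List.takeWhile_append_dropWhile
          (p := fun r => r == sp) (l := rest))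
        rw [List.count_append, count_takeWhile_beq_ne sp x hxne] at hsplit
        rw [List.count_cons_of_ne hxne.symm, ← hsplit, hrest']
        omega
      have h2 : ps.count x = (ps1.drop pw.length).count x := by
        rw [hps2eq]
        have hsplit := congrArg (List.count x) (List.takeWhile_append_dropWhile
          (p := fun p => p == sp) (l := ps1))
        rw [List.count_append, count_takeWhile_beq_ne sp x hxne] at hsplit
        rw [← count_dropWhile_lt sp x (le_of_lt hxgt) ps, ← hps1, ← hsplit, hps1]
        omega
      rw [h1, h2]
    rw [any_congr_mem rest' _ _ hcnt]
    -- split the tail of rs into the head run (all sp, all failing) and the remainder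
    have hanysplit : ∀ (f : String → Bool), rest.any f = (tw.any f || rest'.any f) := by
      intro f
      conv_lhs => rw [← List.takeWhile_append_dropWhile (p := fun r => r == sp) (l := rest)]
      exact List.any_append
    have htwany : tw.any (fun x => decide (ps.count x > (sp :: rest).count x)) = false := by
      rw [List.any_eq_false]
      intro x hx
      have hxsp : x = sp := eq_of_beq (List.mem_takeWhile_imp (p := fun r => r == sp)
        (htw ▸ hx))
      subst hxsp
      simp only [hspf]
      exact Bool.false_ne_true
    simp only [List.any_cons, hanysplit, htwany, hspf, Bool.false_or]

-- counts are invariant under sorting; 'any' of a fixed predicate is too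
lemma any_sorted (l : List String) (f : String → Bool) :
    (PySem.List.sorted l (fun x => x) false).any f = l.any f := by
  rcases h : l.any f with _ | _
  · rw [List.any_eq_false] at h ⊢
    intro x hx
    exact h x ((PySem.List.sorted_perm l (fun x => x) false).mem_iff.mp hx)
  · rw [List.any_eq_true] at h ⊢
    obtain ⟨x, hx, hfx⟩ := h
    exact ⟨x, (PySem.List.sorted_perm l (fun x => x) false).mem_iff.mpr hx, hfx⟩

-- ===== VERDICT (by name: the statement is the Claim_ definition above) =====
theorem is_autocatalytic_py_spec : Claim_equal_is_autocatalytic_py := by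
  intro reactants products _
  unfold Spec_is_autocatalytic_py is_autocatalytic_py is_autocatalytic_py_alt
  rw [PySem.Dict.foldl_insert_getD_add_one_eq_counter,
      PySem.Dict.foldl_insert_getD_add_one_eq_counter,
      isAutoLoopA_eq_any, PySem.Dict.keys_counter]
  have hfun : (fun sp => decide ((PySem.Dict.counter products).getD sp 0 > (PySem.Dict.counter reactants).getD sp 0) && (PySem.Dict.counter reactants).contains sp)
      = (fun sp => isAutoP reactants products sp && decide (sp ∈ reactants)) := by
    funext sp
    rw [PySem.Dict.getD_counter, PySem.Dict.getD_counter, PySem.Dict.contains_counter]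
    simp [isAutoP]
  rw [hfun, any_products_eq_any_reactants]
  rw [pvScan_eq_any _ _ (by simpa using PySem.List.sorted_pairwise reactants (fun x => x))
        (by simpa using PySem.List.sorted_pairwise products (fun x => x))]
  have hcnt : (fun x => decide ((PySem.List.sorted products (fun x => x) false).count x > (PySem.List.sorted reactants (fun x => x) false).count x))
      = isAutoP reactants products := by
    funext x
    rw [(PySem.List.sorted_perm products (fun x => x) false).count_eq,
        (PySem.List.sorted_perm reactants (fun x => x) false).count_eq]
    rfl
  rw [hcnt, any_sorted]
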